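-- pv_equiv track=rewrite | github.com/HelenoPaiva/AnesthesiaTOC | scripts/build_data.py | category_from_pubmed_types
-- ===== SOURCE A (Python) =====
-- from typing import Any, Dict, List, Optional, Union
--
-- CAT_META = "Meta-analysis"
--
-- CAT_RCT = "Randomized Control Trials"
--
-- CAT_OBS = "Observational Studies"
--
-- CAT_GUIDE = "Guideline / Consensus"
--
-- CAT_REVIEW = "Review (Narrative / Systematic)"
--
-- CAT_EDITORIAL = "Editorial / Letter / Commentary"
--
-- PUBMED_TYPE_TO_CATEGORY = {
--     # Meta
--     "Meta-Analysis": CAT_META,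
--
--     # RCT / trials (grouped)
--     "Randomized Controlled Trial": CAT_RCT,
--     "Clinical Trial": CAT_RCT,
--     "Clinical Trial, Phase I": CAT_RCT,
--     "Clinical Trial, Phase II": CAT_RCT,
--     "Clinical Trial, Phase III": CAT_RCT,
--     "Clinical Trial, Phase IV": CAT_RCT,
--     "Controlled Clinical Trial": CAT_RCT,
--
--     # Observational (grouped: cohort + case-control under observational)
--     "Observational Study": CAT_OBS,
--     "Cohort Studies": CAT_OBS,
--     "Case-Control Studies": CAT_OBS,
--     "Cross-Sectional Studies": CAT_OBS,
--
--     # Guidelines / consensus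
--     "Practice Guideline": CAT_GUIDE,
--     "Guideline": CAT_GUIDE,
--     "Consensus Development Conference": CAT_GUIDE,
--     "Consensus Development Conference, NIH": CAT_GUIDE,
--
--     # Reviews (grouped: systematic + narrative)
--     "Systematic Review": CAT_REVIEW,
--     "Review": CAT_REVIEW,
--
--     # Editorial / correspondence (grouped)
--     "Editorial": CAT_EDITORIAL,
--     "Comment": CAT_EDITORIAL,
--     "Letter": CAT_EDITORIAL,
-- }
--
-- def category_from_pubmed_types(pub_types: List[str]) -> Optional[str]:
--     if not pub_types:
--         return None
--
--     # Direct mapping with precedence by importance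
--     # Meta > RCT > Guide > Review > Editorial > Observational
--     precedence = [CAT_META, CAT_RCT, CAT_GUIDE, CAT_REVIEW, CAT_EDITORIAL, CAT_OBS]
--
--     mapped: List[str] = []
--     for pt in pub_types:
--         cat = PUBMED_TYPE_TO_CATEGORY.get(pt)
--         if cat:
--             mapped.append(cat)
--
--     if not mapped:
--         return None
--
--     for cat in precedence:
--         if cat in mapped:
--             return cat
--     return mapped[0]
-- ===== SOURCE B (Python) =====
-- CAT_META = "Meta-analysis"
-- CAT_RCT = "Randomized Control Trials"
-- CAT_OBS = "Observational Studies"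
-- CAT_GUIDE = "Guideline / Consensus"
-- CAT_REVIEW = "Review (Narrative / Systematic)"
-- CAT_EDITORIAL = "Editorial / Letter / Commentary"
--
-- PUBMED_TYPE_TO_CATEGORY = {
--     "Meta-Analysis": CAT_META,
--     "Randomized Controlled Trial": CAT_RCT,
--     "Clinical Trial": CAT_RCT,
--     "Clinical Trial, Phase I": CAT_RCT,
--     "Clinical Trial, Phase II": CAT_RCT,
--     "Clinical Trial, Phase III": CAT_RCT,
--     "Clinical Trial, Phase IV": CAT_RCT,
--     "Controlled Clinical Trial": CAT_RCT,
--     "Observational Study": CAT_OBS,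
--     "Cohort Studies": CAT_OBS,
--     "Case-Control Studies": CAT_OBS,
--     "Cross-Sectional Studies": CAT_OBS,
--     "Practice Guideline": CAT_GUIDE,
--     "Guideline": CAT_GUIDE,
--     "Consensus Development Conference": CAT_GUIDE,
--     "Consensus Development Conference, NIH": CAT_GUIDE,
--     "Systematic Review": CAT_REVIEW,
--     "Review": CAT_REVIEW,
--     "Editorial": CAT_EDITORIAL,
--     "Comment": CAT_EDITORIAL,
--     "Letter": CAT_EDITORIAL,
-- }
--
-- _PRECEDENCE = [CAT_META, CAT_RCT, CAT_GUIDE, CAT_REVIEW, CAT_EDITORIAL, CAT_OBS]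
-- _RANK = {cat: i for i, cat in enumerate(_PRECEDENCE)}
--
--
-- def category_from_pubmed_types(pub_types):
--     # single best-so-far pass: keep the minimum precedence rank seen
--     best = None
--     for pt in pub_types:
--         cat = PUBMED_TYPE_TO_CATEGORY.get(pt)
--         if cat is not None:
--             r = _RANK[cat]
--             if best is None or r < best:
--                 best = r
--     return None if best is None else _PRECEDENCE[best]
-- ===== Notes on version B (the rewrite author's own statement) =====
-- stated objective: alternative
-- what changed: Replaced A's two-phase collect-then-scan (build the mapped category list, then scan the precedence list with membership tests, plus an unreachable mapped[0] fallback) by a single best-so-far pass that keeps the minimum precedence rank via a rank index and indexes the precedence list once at the end.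
import Mathlib
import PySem

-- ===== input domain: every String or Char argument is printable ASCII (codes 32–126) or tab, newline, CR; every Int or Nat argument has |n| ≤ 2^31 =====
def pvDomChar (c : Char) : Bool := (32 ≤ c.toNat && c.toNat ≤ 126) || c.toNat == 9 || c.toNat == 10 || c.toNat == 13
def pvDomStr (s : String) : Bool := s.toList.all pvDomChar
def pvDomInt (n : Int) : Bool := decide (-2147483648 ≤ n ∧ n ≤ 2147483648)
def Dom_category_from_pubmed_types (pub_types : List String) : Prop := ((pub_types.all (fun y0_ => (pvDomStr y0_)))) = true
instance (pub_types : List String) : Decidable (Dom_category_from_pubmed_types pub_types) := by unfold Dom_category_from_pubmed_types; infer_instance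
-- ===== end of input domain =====

-- B replaces A's collect-then-scan by a single minimum-rank pass over pub_types (alternative decomposition, same result).

-- shared module constants (both Pythons use the same category names and pubmed-type dict)
def pvCatMeta : String := "Meta-analysis"
def pvCatRct : String := "Randomized Control Trials"
def pvCatObs : String := "Observational Studies"
def pvCatGuide : String := "Guideline / Consensus"
def pvCatReview : String := "Review (Narrative / Systematic)"
def pvCatEditorial : String := "Editorial / Letter / Commentary"

def pvPubmedMap : PySem.Dict String String := PySem.Dict.mk [
  ("Meta-Analysis", pvCatMeta),
  ("Randomized Controlled Trial", pvCatRct),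
  ("Clinical Trial", pvCatRct),
  ("Clinical Trial, Phase I", pvCatRct),
  ("Clinical Trial, Phase II", pvCatRct),
  ("Clinical Trial, Phase III", pvCatRct),
  ("Clinical Trial, Phase IV", pvCatRct),
  ("Controlled Clinical Trial", pvCatRct),
  ("Observational Study", pvCatObs),
  ("Cohort Studies", pvCatObs),
  ("Case-Control Studies", pvCatObs),
  ("Cross-Sectional Studies", pvCatObs),
  ("Practice Guideline", pvCatGuide),
  ("Guideline", pvCatGuide),
  ("Consensus Development Conference", pvCatGuide),
  ("Consensus Development Conference, NIH", pvCatGuide),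
  ("Systematic Review", pvCatReview),
  ("Review", pvCatReview),
  ("Editorial", pvCatEditorial),
  ("Comment", pvCatEditorial),
  ("Letter", pvCatEditorial)]

def pvPrecedence : List String := [pvCatMeta, pvCatRct, pvCatGuide, pvCatReview, pvCatEditorial, pvCatObs]

-- ===== PORT A =====
def category_from_pubmed_types (pub_types : List String) : Option String :=
  if pub_types = [] then none
  else
    -- for pt in pub_types: cat = PUBMED_TYPE_TO_CATEGORY.get(pt); if cat: mapped.append(cat)
    let mapped := pub_types.foldl (fun acc pt =>
      match PySem.Dict.get? pvPubmedMap pt with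
      | some cat => if cat ≠ "" then acc ++ [cat] else acc   -- `if cat:` = nonempty-string truthiness
      | none => acc) []
    if mapped = [] then none
    else
      -- for cat in precedence: if cat in mapped: return cat
      match pvPrecedence.find? (fun c => mapped.contains c) with
      | some c => some c
      | none => PySem.List.pyGet? mapped 0   -- return mapped[0]

-- ===== PORT B =====
-- _RANK = {cat: i for i, cat in enumerate(_PRECEDENCE)}
def pvRank : PySem.Dict String Int := PySem.Dict.mk [
  (pvCatMeta, 0), (pvCatRct, 1), (pvCatGuide, 2), (pvCatReview, 3), (pvCatEditorial, 4), (pvCatObs, 5)]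

def category_from_pubmed_types_alt (pub_types : List String) : Option String :=
  let best := pub_types.foldl (fun best pt =>
    match PySem.Dict.get? pvPubmedMap pt with
    | some cat =>
        let r := (PySem.Dict.get? pvRank cat).getD 0   -- _RANK[cat]; every dict value is a precedence category, so the key is present
        some (match best with | none => r | some b => if r < b then r else b)
    | none => best) none
  match best with
  | none => none
  | some b => PySem.List.pyGet? pvPrecedence b   -- _PRECEDENCE[best]

-- ===== PRECONDITION & SPEC =====
def Spec_category_from_pubmed_types (pub_types : List String) (out : Option String) : Prop := out = category_from_pubmed_types_alt pub_types
instance (pub_types : List String) (out : Option String) : Decidable (Spec_category_from_pubmed_types pub_types out) := by unfold Spec_category_from_pubmed_types; infer_instance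

-- ===== CLAIM (what is proved, stated in full; the proofs are below) =====
def Claim_equal_category_from_pubmed_types : Prop := ∀ (pub_types : List String), Dom_category_from_pubmed_types pub_types → Spec_category_from_pubmed_types pub_types (category_from_pubmed_types pub_types)

-- ===== LEMMAS AND PROOFS =====

def pvRk (c : String) : Int := (PySem.Dict.get? pvRank c).getD 0

lemma pvG_cases (pt c : String) (h : PySem.Dict.get? pvPubmedMap pt = some c) : c ∈ pvPrecedence := by
  have h' := PySem.Dict.mem_items_of_get?_eq_some _ h
  simp only [pvPubmedMap, List.mem_cons, List.not_mem_nil, or_false, Prod.mk.injEq] at h'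
  rcases h' with ⟨-,rfl⟩|⟨-,rfl⟩|⟨-,rfl⟩|⟨-,rfl⟩|⟨-,rfl⟩|⟨-,rfl⟩|⟨-,rfl⟩|⟨-,rfl⟩|⟨-,rfl⟩|⟨-,rfl⟩|⟨-,rfl⟩|⟨-,rfl⟩|⟨-,rfl⟩|⟨-,rfl⟩|⟨-,rfl⟩|⟨-,rfl⟩|⟨-,rfl⟩|⟨-,rfl⟩|⟨-,rfl⟩|⟨-,rfl⟩|⟨-,rfl⟩ <;> decide


-- A's inner loop equals a filterMap (every looked-up category is nonempty)
lemma pvA_fold (pts : List String) (acc : List String) :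
    pts.foldl (fun acc pt =>
      match PySem.Dict.get? pvPubmedMap pt with
      | some cat => if cat ≠ "" then acc ++ [cat] else acc
      | none => acc) acc
    = acc ++ pts.filterMap (fun pt => PySem.Dict.get? pvPubmedMap pt) := by
  induction pts generalizing acc with
  | nil => simp
  | cons pt pts ih =>
    simp only [List.foldl_cons, List.filterMap_cons]
    cases hm : PySem.Dict.get? pvPubmedMap pt with
    | none => simpa using ih acc
    | some cat =>
      have hc : cat ∈ pvPrecedence := pvG_cases pt cat hm
      have hne : cat ≠ "" := by
        fin_cases hc <;> decide
      simp only [hne, ne_eq, not_false_eq_true, if_true, ih]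
      simp

-- B's loop equals a min-fold over the same filterMap
lemma pvB_fold (pts : List String) (acc : Option Int) :
    pts.foldl (fun best pt =>
      match PySem.Dict.get? pvPubmedMap pt with
      | some cat =>
          let r := (PySem.Dict.get? pvRank cat).getD 0
          some (match best with | none => r | some b => if r < b then r else b)
      | none => best) acc
    = (pts.filterMap (fun pt => PySem.Dict.get? pvPubmedMap pt)).foldl
        (fun best cat => some (match best with | none => pvRk cat | some b => if pvRk cat < b then pvRk cat else b)) acc := by
  induction pts generalizing acc with
  | nil => simp
  | cons pt pts ih =>
    simp only [List.foldl_cons, List.filterMap_cons]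
    cases hm : PySem.Dict.get? pvPubmedMap pt with
    | none => simpa using ih acc
    | some cat => simp [pvRk, ih]

-- the min-fold from a some start is a plain foldl min
lemma pvMinFold_some (m : List String) (b : Int) :
    m.foldl (fun best cat => some (match best with | none => pvRk cat | some bb => if pvRk cat < bb then pvRk cat else bb)) (some b)
    = some (m.foldl (fun x cat => min x (pvRk cat)) b) := by
  induction m generalizing b with
  | nil => simp
  | cons c m ih =>
    have he : (if pvRk c < b then pvRk c else b) = min b (pvRk c) := by split <;> omega
    simp only [List.foldl_cons, ih, he]

-- the foldl-min attains its value and bounds every element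
lemma pvMin_spec (m : List String) (b : Int) :
    ((m.foldl (fun x cat => min x (pvRk cat)) b = b ∨
      ∃ c ∈ m, m.foldl (fun x cat => min x (pvRk cat)) b = pvRk c) ∧
     m.foldl (fun x cat => min x (pvRk cat)) b ≤ b ∧
     ∀ c ∈ m, m.foldl (fun x cat => min x (pvRk cat)) b ≤ pvRk c) := by
  induction m generalizing b with
  | nil => simp
  | cons c m ih =>
    obtain ⟨h1, h2, h3⟩ := ih (min b (pvRk c))
    refine ⟨?_, ?_, ?_⟩
    · rcases h1 with h | ⟨d, hd, h⟩
      · rcases min_cases b (pvRk c) with ⟨he, -⟩ | ⟨he, -⟩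
        · exact Or.inl (by simpa [he] using h)
        · exact Or.inr ⟨c, by simp, by simpa [he] using h⟩
      · exact Or.inr ⟨d, by simp [hd], h⟩
    · exact le_trans h2 (min_le_left _ _)
    · intro d hd
      rcases List.mem_cons.mp hd with rfl | hd
      · exact le_trans h2 (min_le_right _ _)
      · exact h3 d hd

lemma pvFind_pref (p : String → Bool) (pre l : List String) (x : String)
    (h1 : ∀ y ∈ pre, p y = false) (h2 : p x = true) :
    (pre ++ x :: l).find? p = some x := by
  induction pre with
  | nil => simp [h2]
  | cons a as ih =>
    have ha := h1 a (by simp)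
    rw [List.cons_append, List.find?_cons_of_neg (by simp [ha])]
    exact ih (fun y hy => h1 y (by simp [hy]))

lemma pvCore (c : String) (m : List String) (hc : c ∈ pvPrecedence) (hm : ∀ d ∈ m, d ∈ pvPrecedence) :
    (match pvPrecedence.find? (fun x => (c :: m).contains x) with
     | some s => some s
     | none => PySem.List.pyGet? (c :: m) 0)
    = PySem.List.pyGet? pvPrecedence (m.foldl (fun x cat => min x (pvRk cat)) (pvRk c)) := by
  obtain ⟨h1, -, h3⟩ := pvMin_spec m (pvRk c)
  set r := m.foldl (fun x cat => min x (pvRk cat)) (pvRk c) with hrdef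
  have hbd : ∀ e ∈ c :: m, r ≤ pvRk e := by
    intro e he
    rcases List.mem_cons.mp he with rfl | he
    · exact (pvMin_spec m (pvRk e)).2.1
    · exact h3 e he
  have hatt : ∃ d ∈ c :: m, r = pvRk d := by
    rcases h1 with h | ⟨d, hd, h⟩
    · exact ⟨c, by simp, h⟩
    · exact ⟨d, by simp [hd], h⟩
  obtain ⟨d, hd, hr⟩ := hatt
  have hdP : d ∈ pvPrecedence := by
    rcases List.mem_cons.mp hd with rfl | h
    · exact hc
    · exact hm d h
  have hfalse : ∀ y : String, pvRk y < r → (c :: m).contains y = false := by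
    intro y hy
    have : y ∉ c :: m := fun hmem => absurd (hbd y hmem) (by omega)
    simp [this]
  clear hrdef h1 h3
  simp only [pvPrecedence, List.mem_cons, List.not_mem_nil, or_false] at hdP
  have h2 : (c :: m).contains d = true := by simp [hd]
  rcases hdP with rfl | rfl | rfl | rfl | rfl | rfl
  · have hfind : pvPrecedence.find? (fun x => (c :: m).contains x) = some pvCatMeta :=
      pvFind_pref _ [] [pvCatRct, pvCatGuide, pvCatReview, pvCatEditorial, pvCatObs] pvCatMeta
        (by simp) h2
    rw [hfind, hr]
    show some pvCatMeta = PySem.List.pyGet? pvPrecedence (pvRk pvCatMeta)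
    decide
  · have h1' : ∀ y ∈ ([pvCatMeta] : List String), (c :: m).contains y = false := by
      intro y hy
      rcases (by simpa using hy : y = pvCatMeta) with rfl
      exact hfalse _ (by rw [hr]; decide)
    have hfind : pvPrecedence.find? (fun x => (c :: m).contains x) = some pvCatRct :=
      pvFind_pref _ [pvCatMeta] [pvCatGuide, pvCatReview, pvCatEditorial, pvCatObs] pvCatRct h1' h2
    rw [hfind, hr]
    show some pvCatRct = PySem.List.pyGet? pvPrecedence (pvRk pvCatRct)
    decide
  · have h1' : ∀ y ∈ ([pvCatMeta, pvCatRct] : List String), (c :: m).contains y = false := by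
      intro y hy
      rcases (by simpa using hy : y = pvCatMeta ∨ y = pvCatRct) with rfl | rfl <;>
        exact hfalse _ (by rw [hr]; decide)
    have hfind : pvPrecedence.find? (fun x => (c :: m).contains x) = some pvCatGuide :=
      pvFind_pref _ [pvCatMeta, pvCatRct] [pvCatReview, pvCatEditorial, pvCatObs] pvCatGuide h1' h2
    rw [hfind, hr]
    show some pvCatGuide = PySem.List.pyGet? pvPrecedence (pvRk pvCatGuide)
    decide
  · have h1' : ∀ y ∈ ([pvCatMeta, pvCatRct, pvCatGuide] : List String), (c :: m).contains y = false := by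
      intro y hy
      rcases (by simpa using hy : y = pvCatMeta ∨ y = pvCatRct ∨ y = pvCatGuide) with rfl | rfl | rfl <;>
        exact hfalse _ (by rw [hr]; decide)
    have hfind : pvPrecedence.find? (fun x => (c :: m).contains x) = some pvCatReview :=
      pvFind_pref _ [pvCatMeta, pvCatRct, pvCatGuide] [pvCatEditorial, pvCatObs] pvCatReview h1' h2
    rw [hfind, hr]
    show some pvCatReview = PySem.List.pyGet? pvPrecedence (pvRk pvCatReview)
    decide
  · have h1' : ∀ y ∈ ([pvCatMeta, pvCatRct, pvCatGuide, pvCatReview] : List String), (c :: m).contains y = false := by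
      intro y hy
      rcases (by simpa using hy : y = pvCatMeta ∨ y = pvCatRct ∨ y = pvCatGuide ∨ y = pvCatReview) with rfl | rfl | rfl | rfl <;>
        exact hfalse _ (by rw [hr]; decide)
    have hfind : pvPrecedence.find? (fun x => (c :: m).contains x) = some pvCatEditorial :=
      pvFind_pref _ [pvCatMeta, pvCatRct, pvCatGuide, pvCatReview] [pvCatObs] pvCatEditorial h1' h2
    rw [hfind, hr]
    show some pvCatEditorial = PySem.List.pyGet? pvPrecedence (pvRk pvCatEditorial)
    decide
  · have h1' : ∀ y ∈ ([pvCatMeta, pvCatRct, pvCatGuide, pvCatReview, pvCatEditorial] : List String), (c :: m).contains y = false := by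
      intro y hy
      rcases (by simpa using hy : y = pvCatMeta ∨ y = pvCatRct ∨ y = pvCatGuide ∨ y = pvCatReview ∨ y = pvCatEditorial) with rfl | rfl | rfl | rfl | rfl <;>
        exact hfalse _ (by rw [hr]; decide)
    have hfind : pvPrecedence.find? (fun x => (c :: m).contains x) = some pvCatObs :=
      pvFind_pref _ [pvCatMeta, pvCatRct, pvCatGuide, pvCatReview, pvCatEditorial] [] pvCatObs h1' h2
    rw [hfind, hr]
    show some pvCatObs = PySem.List.pyGet? pvPrecedence (pvRk pvCatObs)
    decide


lemma pvMain (pts : List String) :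
    category_from_pubmed_types pts = category_from_pubmed_types_alt pts := by
  by_cases hpts : pts = []
  · simp [category_from_pubmed_types, category_from_pubmed_types_alt, hpts]
  · simp only [category_from_pubmed_types, category_from_pubmed_types_alt, if_neg hpts,
      pvA_fold, pvB_fold, List.nil_append]
    cases hM : pts.filterMap (fun pt => PySem.Dict.get? pvPubmedMap pt) with
    | nil => simp
    | cons c m =>
      have hmem : ∀ d ∈ c :: m, d ∈ pvPrecedence := by
        intro d hd
        have : d ∈ pts.filterMap (fun pt => PySem.Dict.get? pvPubmedMap pt) := by
          rw [hM]; exact hd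
        obtain ⟨pt, -, hpt⟩ := List.mem_filterMap.mp this
        exact pvG_cases pt d hpt
      have hc : c ∈ pvPrecedence := hmem c (by simp)
      have hm : ∀ d ∈ m, d ∈ pvPrecedence := fun d hd => hmem d (by simp [hd])
      simp only [List.foldl_cons, if_neg (List.cons_ne_nil c m)]
      have := pvCore c m hc hm
      rw [pvMinFold_some m (pvRk c)]
      exact this

-- ===== VERDICT (by name: the statement is the Claim_ definition above) =====
theorem category_from_pubmed_types_spec : Claim_equal_category_from_pubmed_types := by
  intro pub_types _
  unfold Spec_category_from_pubmed_types
  exact pvMain pub_types
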